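-- pv_equiv track=rewrite | github.com/Imbaman1a/Algorith-Handbook-by-Yandex | 6.4/C/C.py | min_total_length
-- ===== SOURCE A (Python) =====
-- def min_total_length(n, k, points):
--     if k >= n:
--         return 0  # Если отрезков больше или столько же, как точек, длина будет 0 (отрезки нулевой длины)
--
--     points.sort()  # Сортируем точки по возрастанию
--     # Находим расстояния между соседними точками
--     gaps = [points[i + 1] - points[i] for i in range(n - 1)]
--
--     # Сортируем разрывы по убыванию
--     gaps.sort(reverse=True)
--
--     # Минимальная длина - сумма всех расстояний минус (k-1) самых больших разрывов
--     min_length = sum(gaps) - sum(gaps[:k - 1])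
--
--     return min_length
-- ===== SOURCE B (Python) =====
-- def min_total_length(n, k, points):
--     if k >= n:
--         return 0
--     points.sort()
--     span = points[n - 1] - points[0]
--     gaps = [points[i + 1] - points[i] for i in range(n - 1)]
--     for _ in range(k - 1):
--         m = max(gaps)
--         span -= m
--         gaps.remove(m)
--     return span
-- ===== Notes on version B (the rewrite author's own statement) =====
-- stated objective: alternative
-- what changed: B computes the total span in closed form as points[n-1]-points[0] and then greedily extracts the k-1 largest gaps one at a time (repeated max + remove, subtracting each from the span), instead of A's full descending sort of the gaps followed by slice-and-double-sum.
-- outside the precondition, e.g. on min_total_length(3, 0, [1, 2, 10]): A returns 1, B returns 9; on min_total_length(4, 2, [1, 2]): A raises IndexError, B raises IndexError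
import Mathlib
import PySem

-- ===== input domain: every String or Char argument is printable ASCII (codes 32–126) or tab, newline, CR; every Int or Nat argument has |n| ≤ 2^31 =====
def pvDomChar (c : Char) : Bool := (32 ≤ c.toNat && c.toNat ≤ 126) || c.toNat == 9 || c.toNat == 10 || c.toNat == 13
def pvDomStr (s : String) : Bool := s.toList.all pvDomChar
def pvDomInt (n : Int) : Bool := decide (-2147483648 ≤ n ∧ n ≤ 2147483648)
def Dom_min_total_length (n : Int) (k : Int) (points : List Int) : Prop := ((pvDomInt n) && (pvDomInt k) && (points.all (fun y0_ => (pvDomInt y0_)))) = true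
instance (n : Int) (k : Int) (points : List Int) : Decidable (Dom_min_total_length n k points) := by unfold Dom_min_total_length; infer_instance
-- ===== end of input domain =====

-- B replaces A's descending gap sort plus slice-and-double-sum by a closed-form span
-- (points[n-1] - points[0]) from which it greedily extracts the k-1 largest gaps one at a
-- time (repeated max + remove) — an alternative decomposition, not faster; in Python both
-- A and B sort the `points` argument in place — the equivalence proved here is about the
-- return value.


-- ===== PORT A =====
def min_total_length (n : Int) (k : Int) (points : List Int) : Int :=
  if k ≥ n then 0
  else
    let s := PySem.List.sorted points (fun x => x) false
    let gaps := (PySem.List.pyRange 0 (n - 1) 1).map (fun i =>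
      PySem.List.pyGetD s (i + 1) 0 - PySem.List.pyGetD s i 0)
    let gapsD := PySem.List.sorted gaps (fun x => x) true
    gapsD.sum - (PySem.List.slice gapsD none (some (k - 1))).sum

-- ===== PORT B =====
-- the body of B's 'for _ in range(k-1)' loop: m = max(gaps); span -= m; gaps.remove(m)
def pvStep (st : Int × List Int) : Int × List Int :=
  let m := (PySem.List.max? st.2 (fun x => x)).getD 0
  (st.1 - m, (PySem.List.remove? st.2 m).getD st.2)

def min_total_length_alt (n : Int) (k : Int) (points : List Int) : Int :=
  if k ≥ n then 0
  else
    let s := PySem.List.sorted points (fun x => x) false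
    let span := PySem.List.pyGetD s (n - 1) 0 - PySem.List.pyGetD s 0 0
    let gaps := (PySem.List.pyRange 0 (n - 1) 1).map (fun i =>
      PySem.List.pyGetD s (i + 1) 0 - PySem.List.pyGetD s i 0)
    ((PySem.List.pyRange 0 (k - 1) 1).foldl (fun st _ => pvStep st) (span, gaps)).1

-- ===== PRECONDITION & SPEC =====
-- Pre_ excludes (a) n > len(points) with k < n, where A raises IndexError building the gaps, and
-- (b) the unnatural segment count k ≤ 0 with k < n, where A's value comes from the negative-slice
-- wraparound gaps[:k-1] (B's loop runs zero times there and keeps the whole span).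
def Pre_min_total_length (n : Int) (k : Int) (points : List Int) : Prop :=
  k ≥ n ∨ (1 ≤ k ∧ n ≤ (points.length : Int))
instance (n : Int) (k : Int) (points : List Int) : Decidable (Pre_min_total_length n k points) := by
  unfold Pre_min_total_length; infer_instance

def pvWitness_min_total_length : Int × Int × List Int := (3, 2, [5, 1, 10])

def Spec_min_total_length (n : Int) (k : Int) (points : List Int) (out : Int) : Prop := out = min_total_length_alt n k points
instance (n : Int) (k : Int) (points : List Int) (out : Int) : Decidable (Spec_min_total_length n k points out) := by unfold Spec_min_total_length; infer_instance

-- ===== CLAIM (what is proved, stated in full; the proofs are below) =====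
def Claim_equal_min_total_length : Prop := ∀ (n : Int) (k : Int) (points : List Int), Dom_min_total_length n k points → Pre_min_total_length n k points → Spec_min_total_length n k points (min_total_length n k points)

-- ===== LEMMAS AND PROOFS =====

-- a fold that ignores the list elements is an iterate of the step
theorem pv_foldl_iterate (l : List Int) (init : Int × List Int) :
    l.foldl (fun st _ => pvStep st) init = pvStep^[l.length] init := by
  induction l generalizing init with
  | nil => rfl
  | cons x t ih => simpa [List.foldl_cons, Function.iterate_succ_apply] using ih (pvStep init)

-- one step on a permutation of a descending list m :: t subtracts m and leaves a permutation of t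
theorem pv_step_eq (a : Int) (l : List Int) (m : Int) (hm : m ∈ l) (hmax : ∀ y ∈ l, y ≤ m) :
    pvStep (a, l) = (a - m, l.erase m) := by
  have hne : l ≠ [] := by intro h; simp [h] at hm
  obtain ⟨m', hm'⟩ : ∃ m', PySem.List.max? l (fun x => x) = some m' := by
    cases h : PySem.List.max? l (fun x => x) with
    | none => exact absurd ((PySem.List.max?_eq_none_iff l (fun x => x)).mp h) hne
    | some v => exact ⟨v, rfl⟩
  have h1 : m' ∈ l := PySem.List.max?_mem hm'
  have h2 : ∀ y ∈ l, y ≤ m' := fun y hy => PySem.List.max?_isMax hm' y hy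
  have hmm : m' = m := le_antisymm (hmax m' h1) (h2 m hm)
  have hr : PySem.List.remove? l m = some (l.erase m) := PySem.List.remove?_eq_some_erase l m hm
  simp [pvStep, hm', hmm, hr]

-- invariant: after j extractions the span has lost the j largest gaps
theorem pv_iter (j : Nat) : ∀ (d l : List Int) (a : Int),
    d.Pairwise (fun x y => y ≤ x) → j ≤ d.length → l.Perm d →
    ∃ l', pvStep^[j] (a, l) = (a - (d.take j).sum, l') ∧ l'.Perm (d.drop j) := by
  induction j with
  | zero => intro d l a _ _ hp; exact ⟨l, by simp, by simpa⟩
  | succ j ih =>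
    intro d l a hpw hlen hp
    match d with
    | [] => simp at hlen
    | m :: t =>
      have hmem : m ∈ l := hp.mem_iff.mpr (List.mem_cons_self)
      have hmax : ∀ y ∈ l, y ≤ m := by
        intro y hy
        rcases List.mem_cons.mp (hp.mem_iff.mp hy) with h | h
        · exact le_of_eq h
        · exact (List.pairwise_cons.mp hpw).1 y h
      have hperase : (l.erase m).Perm t := by
        have := hp.erase m
        simpa using this
      obtain ⟨l', hl', hpl'⟩ := ih t (l.erase m) (a - m)
        (List.pairwise_cons.mp hpw).2 (by simpa using hlen) hperase
      refine ⟨l', ?_, by simpa using hpl'⟩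
      rw [Function.iterate_succ_apply, pv_step_eq a l m hmem hmax, hl']
      simp [List.sum_cons]
      ring_nf

-- telescoping: the sum of the adjacent gaps of s[0..m] is s[m] - s[0]
theorem pv_tele (s : List Int) (m : Nat) (h : m < s.length) :
    ((PySem.List.pyRange 0 (m : Int) 1).map (fun i =>
      PySem.List.pyGetD s (i + 1) 0 - PySem.List.pyGetD s i 0)).sum
    = PySem.List.pyGetD s (m : Int) 0 - PySem.List.pyGetD s 0 0 := by
  induction m with
  | zero => simp [PySem.List.pyRange_one_eq_nil]
  | succ m ih =>
    have hcast : ((m + 1 : Nat) : Int) = (m : Int) + 1 := by push_cast; ring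
    rw [hcast, PySem.List.pyRange_one_succ_right (by positivity), List.map_append, List.sum_append]
    rw [ih (by omega)]
    simp

theorem pv_main_eq (n k : Int) (points : List Int)
    (hpre : k ≥ n ∨ (1 ≤ k ∧ n ≤ (points.length : Int))) :
    min_total_length n k points = min_total_length_alt n k points := by
  unfold min_total_length min_total_length_alt
  by_cases h : k ≥ n
  · simp [h]
  · simp only [h, if_false]
    have hk : 1 ≤ k := by rcases hpre with h' | ⟨h1, _⟩ <;> [exact absurd h' h; exact h1]
    have hn : n ≤ (points.length : Int) := by
      rcases hpre with h' | ⟨_, h2⟩ <;> [exact absurd h' h; exact h2]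
    have h2 : 2 ≤ n := by omega
    set s := PySem.List.sorted points (fun x => x) false with hs
    have hslen : s.length = points.length := PySem.List.length_sorted ..
    set g := (PySem.List.pyRange 0 (n - 1) 1).map (fun i =>
      PySem.List.pyGetD s (i + 1) 0 - PySem.List.pyGetD s i 0) with hg
    have hglen : g.length = (n - 1).toNat := by
      rw [hg, List.length_map, PySem.List.length_pyRange_one]; omega
    set d := PySem.List.sorted g (fun x => x) true with hd
    have hdperm : d.Perm g := PySem.List.sorted_perm ..
    have hdlen : d.length = g.length := PySem.List.length_sorted ..
    have hpw : d.Pairwise (fun x y => y ≤ x) := by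
      simpa using PySem.List.sorted_pairwise_rev g (fun x => x)
    have hjle : (k - 1).toNat ≤ d.length := by rw [hdlen, hglen]; omega
    -- B's loop
    rw [pv_foldl_iterate]
    simp only [PySem.List.length_pyRange_one]
    obtain ⟨l', hl', _⟩ := pv_iter (k - 1).toNat d g
      (PySem.List.pyGetD s (n - 1) 0 - PySem.List.pyGetD s 0 0) hpw hjle hdperm.symm
    rw [show (k - 1 - 0).toNat = (k - 1).toNat from by omega, hl']
    -- A's slice
    have hsl : PySem.List.slice d none (some (k - 1)) = d.take (k - 1).toNat :=
      PySem.List.slice_to _ (b := k - 1) (by omega)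
    rw [hsl]
    -- span = sum of gaps
    have hm : ((n - 1).toNat : Int) = n - 1 := by omega
    have htele := pv_tele s (n - 1).toNat (by omega)
    rw [hm] at htele
    rw [← hg] at htele
    have hsum : d.sum = g.sum := hdperm.sum_eq
    rw [hsum, ← htele]

-- ===== VERDICT (by name: the statement is the Claim_ definition above) =====
theorem min_total_length_spec : Claim_equal_min_total_length := by
  intro n k points _ hpre
  exact pv_main_eq n k points hpre
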